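-- pv_equiv track=rewrite | github.com/534602988/health_science_articles | calculate_index.py | count_parallelism
-- ===== SOURCE A (Python) =====
-- def count_parallelism(word_list: list, conjunctions_list: list) -> dict:
--     """
--     Counts the number of parallelism occurrences in a given word list.
--
--     Parallelism occurs when a word appears at least three times in the list
--     and the positions of its occurrences are within a distance of 5.
--
--     Args:
--         word_list (list): A list of words.
--
--     Returns:
--         dict: A dictionary containing the count of parallelism occurrences.
--             The count is stored under the key "parallelism".
--     """
--     from collections import defaultdict
--
--     filtered_lst = [item for item in word_list if item in conjunctions_list]
--     positions = defaultdict(list)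
--     for idx, value in enumerate(filtered_lst):
--         positions[value].append(idx)
--     result = []
--     for value, pos_list in positions.items():
--         if len(pos_list) >= 3:
--             count = 0
--             for i in range(len(pos_list) - 1):
--                 for j in range(i + 1, len(pos_list)):
--                     if pos_list[j] - pos_list[i] < 5:
--                         count += 1
--                         if count >= 3:
--                             result.append(value)
--                             break
--                 if count >= 3:
--                     break
--
--     return {"parallelism": len(result)}
-- ===== SOURCE B (Python) =====
-- def count_parallelism(word_list: list, conjunctions_list: list) -> dict:
--     conj = set(conjunctions_list)
--     positions = {}
--     idx = 0
--     for w in word_list: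
--         if w in conj:
--             positions.setdefault(w, []).append(idx)
--             idx += 1
--     n = 0
--     for pos in positions.values():
--         if len(pos) >= 3:
--             pairs = 0
--             l = 0
--             for r in range(1, len(pos)):
--                 while pos[r] - pos[l] >= 5:
--                     l += 1
--                 pairs += r - l
--             if pairs >= 3:
--                 n += 1
--     return {"parallelism": n}
-- ===== Notes on version B (the rewrite author's own statement) =====
-- stated objective: faster
-- what changed: B replaces A's O(n*m) list-membership filter with a set and A's per-word quadratic double loop over occurrence pairs (with early break) with a single left-to-right two-pointer sweep that counts all close pairs in linear time.
import Mathlib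
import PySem

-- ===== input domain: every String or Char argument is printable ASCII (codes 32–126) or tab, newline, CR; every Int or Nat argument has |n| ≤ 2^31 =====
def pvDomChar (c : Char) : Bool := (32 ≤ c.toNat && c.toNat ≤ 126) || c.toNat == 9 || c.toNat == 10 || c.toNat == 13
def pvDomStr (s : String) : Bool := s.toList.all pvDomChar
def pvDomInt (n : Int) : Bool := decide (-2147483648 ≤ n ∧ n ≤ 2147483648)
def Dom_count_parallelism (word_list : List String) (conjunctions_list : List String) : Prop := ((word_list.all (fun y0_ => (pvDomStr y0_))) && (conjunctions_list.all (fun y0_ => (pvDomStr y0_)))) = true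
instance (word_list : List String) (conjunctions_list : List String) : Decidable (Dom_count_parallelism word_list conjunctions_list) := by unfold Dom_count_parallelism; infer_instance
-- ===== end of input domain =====

-- B replaces A's O(n·m) linear membership filter with a set, and the per-word
-- quadratic close-pair double loop with a linear two-pointer sweep (alternative/faster algorithm, same results).


-- ===== PORT A =====
-- inner loop 'for j in range(i+1, len(pos_list))' with the 'count >= 3' break;
-- returns (count, broke) where broke=true means the word was appended to result.
def aInner (pos : List Int) (pi : Int) (js : List Nat) (count : Int) : Int × Bool :=
  match js with
  | [] => (count, false)
  | j :: rest =>
    if pos.getD j 0 - pi < 5 then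
      if count + 1 ≥ 3 then (count + 1, true)
      else aInner pos pi rest (count + 1)
    else aInner pos pi rest count

-- outer loop 'for i in range(len(pos_list) - 1)' with its own 'count >= 3' break;
-- returns true iff the value was appended.
def aOuter (pos : List Int) (is : List Nat) (count : Int) : Bool :=
  match is with
  | [] => false
  | i :: rest =>
    let r := aInner pos (pos.getD i 0) ((List.range pos.length).drop (i + 1)) count
    if r.2 then true
    else if r.1 ≥ 3 then false
    else aOuter pos rest r.1

def count_parallelism (word_list : List String) (conjunctions_list : List String) : List (String × Int) :=
  let filtered := word_list.filter (fun item => conjunctions_list.contains item)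
  let positions : PySem.Dict String (List Int) :=
    (PySem.List.enumerate filtered).foldl
      (fun d p => d.modify p.2 [] (fun l => l ++ [p.1])) PySem.Dict.empty
  let result : List String := positions.items.foldl
    (fun res p =>
      if p.2.length ≥ 3 then
        (if aOuter p.2 (List.range (p.2.length - 1)) 0 then res ++ [p.1] else res)
      else res) []
  [("parallelism", (result.length : Int))]

-- ===== PORT B =====
-- 'while pos[r] - pos[l] >= 5: l += 1' (the l < r test only makes the recursion
-- structurally total; Python stops at l = r anyway since pos[r] - pos[r] = 0 < 5).
def bAdvance (pos : List Int) (r : Nat) (l : Nat) : Nat :=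
  if l < r then
    if pos.getD r 0 - pos.getD l 0 ≥ 5 then bAdvance pos r (l + 1) else l
  else l
termination_by r - l

-- 'for r in range(1, len(pos)): while …; pairs += r - l'
def bSweep (pos : List Int) : Int :=
  ((List.range' 1 (pos.length - 1)).foldl
    (fun (st : Nat × Int) r =>
      let l := bAdvance pos r st.1
      (l, st.2 + ((r : Int) - (l : Int)))) (0, 0)).2

def count_parallelism_alt (word_list : List String) (conjunctions_list : List String) : List (String × Int) :=
  let conj : PySem.Set String := PySem.Set.ofList conjunctions_list
  let positions : PySem.Dict String (List Int) :=
    (word_list.foldl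
      (fun (st : PySem.Dict String (List Int) × Int) w =>
        if conj.contains w then (st.1.modify w [] (fun l => l ++ [st.2]), st.2 + 1) else st)
      (PySem.Dict.empty, 0)).1
  let n : Int := positions.values.foldl
    (fun n pos =>
      if pos.length ≥ 3 then (if bSweep pos ≥ 3 then n + 1 else n) else n) 0
  [("parallelism", n)]

-- ===== PRECONDITION & SPEC =====
def Spec_count_parallelism (word_list : List String) (conjunctions_list : List String) (out : List (String × Int)) : Prop := out = count_parallelism_alt word_list conjunctions_list
instance (word_list : List String) (conjunctions_list : List String) (out : List (String × Int)) : Decidable (Spec_count_parallelism word_list conjunctions_list out) := by unfold Spec_count_parallelism; infer_instance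

-- ===== CLAIM (what is proved, stated in full; the proofs are below) =====
def Claim_equal_count_parallelism : Prop := ∀ (word_list : List String) (conjunctions_list : List String), Dom_count_parallelism word_list conjunctions_list → Spec_count_parallelism word_list conjunctions_list (count_parallelism word_list conjunctions_list)

-- ===== LEMMAS AND PROOFS =====

-- number of j with i < j < n and pos[j] - pos[i] < 5 (A's inner count, ignoring the break)
def cntFrom (pos : List Int) (i : Nat) : Nat :=
  ((List.range pos.length).drop (i + 1)).countP (fun j => decide (pos.getD j 0 - pos.getD i 0 < 5))

-- number of l with l < r and pos[r] - pos[l] < 5 (B's per-r window size)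
def cntTo (pos : List Int) (r : Nat) : Nat :=
  (List.range r).countP (fun l => decide (pos.getD r 0 - pos.getD l 0 < 5))

def Mono (pos : List Int) : Prop := List.Pairwise (· < ·) pos

-- least l at which B's while loop stops for this r
def tP (pos : List Int) (r : Nat) : Nat :=
  Nat.find (p := fun l => r ≤ l ∨ pos.getD r 0 - pos.getD l 0 < 5) ⟨r, Or.inl le_rfl⟩

theorem aInner_spec (pos : List Int) (pi : Int) (js : List Nat) : ∀ (count : Int),
    count < 3 →
    aInner pos pi js count =
      if 3 ≤ count + (js.countP (fun j => decide (pos.getD j 0 - pi < 5)) : Int)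
      then (3, true)
      else (count + (js.countP (fun j => decide (pos.getD j 0 - pi < 5)) : Int), false) := by
  induction js with
  | nil => intro count h; simp [aInner]; omega
  | cons j rest ih =>
    intro count h
    rw [aInner]
    simp only [List.countP_cons]
    by_cases hj : pos.getD j 0 - pi < 5
    · simp only [hj, decide_true, if_pos]
      by_cases h3 : count + 1 ≥ 3
      · rw [if_pos h3, if_pos (by push_cast; omega)]
        exact Prod.ext (by omega) rfl
      · rw [if_neg h3, ih (count + 1) (by omega)]
        push_cast
        split_ifs with h1 h2 h2
        · rfl
        · omega
        · omega
        · exact Prod.ext (by push_cast; omega) rfl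
    · simp only [hj, decide_false, if_false]
      rw [ih count h]; push_cast; norm_num

theorem aOuter_spec (pos : List Int) (is : List Nat) : ∀ (count : Int), count < 3 →
    aOuter pos is count = decide (3 ≤ count + ((is.map (fun i => (cntFrom pos i : Int))).sum)) := by
  induction is with
  | nil => intro count h; simp [aOuter]; omega
  | cons i rest ih =>
    intro count h
    rw [aOuter]
    have hA := aInner_spec pos (pos.getD i 0) ((List.range pos.length).drop (i+1)) count h
    rw [show ((List.range pos.length).drop (i+1)).countP (fun j => decide (pos.getD j 0 - pos.getD i 0 < 5)) = cntFrom pos i from rfl] at hA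
    simp only [hA]
    have hs : 0 ≤ (rest.map (fun i => (cntFrom pos i : Int))).sum := by
      apply List.sum_nonneg; intro x hx; simp at hx; obtain ⟨a, _, rfl⟩ := hx; positivity
    by_cases h1 : 3 ≤ count + (cntFrom pos i : Int)
    · rw [if_pos h1]
      simp only [List.map_cons, List.sum_cons, if_true]
      rw [eq_comm, decide_eq_true_eq]
      omega
    · rw [if_neg h1]
      simp only [ge_iff_le]
      rw [if_neg h1, ih _ (by omega)]
      simp only [List.map_cons, List.sum_cons, ← add_assoc]
      simp

theorem tP_le (pos : List Int) (r : Nat) : tP pos r ≤ r :=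
  Nat.find_le (Or.inl le_rfl)

theorem tP_spec (pos : List Int) (r : Nat) : r ≤ tP pos r ∨ pos.getD r 0 - pos.getD (tP pos r) 0 < 5 :=
  Nat.find_spec (p := fun l => r ≤ l ∨ pos.getD r 0 - pos.getD l 0 < 5) ⟨r, Or.inl le_rfl⟩

theorem tP_min (pos : List Int) (r : Nat) {l : Nat} (hl : l < tP pos r) :
    l < r ∧ 5 ≤ pos.getD r 0 - pos.getD l 0 := by
  have := Nat.find_min (p := fun l => r ≤ l ∨ pos.getD r 0 - pos.getD l 0 < 5) ⟨r, Or.inl le_rfl⟩ hl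
  have h1 := tP_le pos r
  constructor <;> omega

theorem bAdvance_eq (pos : List Int) (r : Nat) : ∀ (l : Nat), l ≤ tP pos r → bAdvance pos r l = tP pos r := by
  have ht := tP_le pos r
  have hs := tP_spec pos r
  intro l hl
  induction hfuel : tP pos r - l generalizing l with
  | zero =>
    have hle : l = tP pos r := by omega
    subst hle
    rw [bAdvance]
    split_ifs with h1 h2
    · omega
    · rfl
    · rfl
  | succ k ih =>
    have hlt : l < tP pos r := by omega
    obtain ⟨h1, h2⟩ := tP_min pos r hlt
    rw [bAdvance, if_pos h1, if_pos h2]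
    exact ih (l + 1) (by omega) (by omega)

theorem mono_getD (pos : List Int) (hmono : Mono pos) {a b : Nat} (hab : a ≤ b) (hb : b < pos.length) :
    pos.getD a 0 ≤ pos.getD b 0 := by
  rcases Nat.lt_or_ge a b with h | h
  · rw [List.getD_eq_getElem _ _ (by omega), List.getD_eq_getElem _ _ hb]
    exact le_of_lt ((List.pairwise_iff_getElem.mp hmono) a b (by omega) hb h)
  · have : a = b := by omega
    subst this; rfl

theorem tP_mono (pos : List Int) (hmono : Mono pos) (r : Nat) (hr : r + 1 < pos.length) :
    tP pos r ≤ tP pos (r + 1) := by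
  by_contra hc
  push_neg at hc
  obtain ⟨h1, h2⟩ := tP_min pos r hc
  rcases tP_spec pos (r + 1) with h3 | h3
  · have := tP_le pos (r + 1); omega
  · have hg : pos.getD r 0 ≤ pos.getD (r + 1) 0 := mono_getD pos hmono (by omega) hr
    omega

theorem countP_range_ge (t : Nat) : ∀ (r : Nat), (List.range r).countP (fun l => decide (t ≤ l)) = r - t := by
  intro r
  induction r with
  | zero => simp
  | succ r ih =>
    rw [List.range_succ, List.countP_append, ih]
    by_cases h : t ≤ r
    · simp [h]; omega
    · simp [h]; omega

theorem cntTo_eq (pos : List Int) (hmono : Mono pos) (r : Nat) (hr : r < pos.length) :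
    cntTo pos r = r - tP pos r := by
  unfold cntTo
  have h1 : ∀ l ∈ List.range r, (decide (pos.getD r 0 - pos.getD l 0 < 5)) = decide (tP pos r ≤ l) := by
    intro l hl
    rw [List.mem_range] at hl
    rcases Nat.lt_or_ge l (tP pos r) with h | h
    · obtain ⟨_, h2⟩ := tP_min pos r h
      rw [decide_eq_false (by omega), decide_eq_false (by omega)]
    · have ht : tP pos r < r := by omega
      rcases tP_spec pos r with h3 | h3
      · omega
      · have hg : pos.getD (tP pos r) 0 ≤ pos.getD l 0 := mono_getD pos hmono h (by omega)
        rw [decide_eq_true (by omega), decide_eq_true (by omega)]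
  rw [List.countP_congr (fun x hx => by rw [h1 x hx])]
  exact countP_range_ge _ r

theorem bSweep_go (pos : List Int) (hmono : Mono pos) :
    ∀ (m r0 : Nat) (l0 : Nat) (acc : Int), (0 < m → l0 ≤ tP pos r0) → r0 + m ≤ pos.length →
    ((List.range' r0 m).foldl
      (fun (st : Nat × Int) r =>
        let l := bAdvance pos r st.1
        (l, st.2 + ((r : Int) - (l : Int)))) (l0, acc)).2
      = acc + ((List.range' r0 m).map (fun r => (cntTo pos r : Int))).sum := by
  intro m
  induction m with
  | zero => intro r0 l0 acc _ _; simp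
  | succ k ih =>
    intro r0 l0 acc hl hr
    rw [List.range'_succ, List.foldl_cons, List.map_cons, List.sum_cons]
    simp only
    rw [bAdvance_eq pos r0 l0 (hl (by omega))]
    rw [ih (r0 + 1) (tP pos r0) (acc + ((r0 : Int) - (tP pos r0 : Int)))
        (fun hk => tP_mono pos hmono r0 (by omega)) (by omega)]
    rw [cntTo_eq pos hmono r0 (by omega)]
    have := tP_le pos r0
    push_cast [Nat.cast_sub this]
    ring

theorem sum_map_cast (l : List Nat) (f : Nat → Nat) :
    ((l.map (fun r => (f r : Int))).sum) = (((l.map f).sum : Nat) : Int) := by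
  induction l with
  | nil => simp
  | cons a t ih => simp [ih]

theorem bSweep_eq (pos : List Int) (hmono : Mono pos) (hn : 1 ≤ pos.length) :
    bSweep pos = (((List.range pos.length).map (fun r => cntTo pos r)).sum : Int) := by
  unfold bSweep
  rw [bSweep_go pos hmono (pos.length - 1) 1 0 0 (fun _ => Nat.zero_le _) (by omega)]
  rw [List.range_eq_range', show pos.length = (pos.length - 1) + 1 by omega, List.range'_succ]
  rw [List.map_cons, List.sum_cons]
  have h0 : cntTo pos 0 = 0 := by simp [cntTo]
  rw [h0, sum_map_cast]
  push_cast
  ring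


theorem sum_ite_countP (n : Nat) (P : Nat → Bool) :
    ((List.range n).map (fun i => if P i then 1 else 0)).sum = (List.range n).countP P := by
  induction n with
  | zero => simp
  | succ n ih => rw [List.range_succ]; simp [List.countP_append, ih, List.countP_cons]

theorem pair_exchange (P : Nat → Nat → Bool) (n : Nat) :
    ((List.range n).map (fun i => ((List.range n).drop (i + 1)).countP (fun j => P i j))).sum
      = ((List.range n).map (fun r => (List.range r).countP (fun l => P l r))).sum := by
  induction n with
  | zero => simp
  | succ n ih =>
    rw [List.range_succ, List.map_append, List.sum_append, List.map_append, List.sum_append]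
    have h1 : ∀ i ∈ List.range n,
        ((List.range n ++ [n]).drop (i + 1)).countP (fun j => P i j)
          = ((List.range n).drop (i + 1)).countP (fun j => P i j) + (if P i n then 1 else 0) := by
      intro i hi
      rw [List.mem_range] at hi
      rw [List.drop_append_of_le_length (by simpa using hi), List.countP_append]
      simp [List.countP_cons]
    rw [List.map_congr_left h1, List.sum_map_add, sum_ite_countP, ih]
    have h2 : (List.map (fun i => ((List.range n ++ [n]).drop (i + 1)).countP (fun j => P i j)) [n]).sum = 0 := by
      simp only [List.map_cons, List.map_nil, List.sum_cons, List.sum_nil]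
      rw [List.drop_eq_nil_of_le (by simp)]
      simp
    rw [h2]
    simp

theorem sum_cntFrom_eq (pos : List Int) (hn : 1 ≤ pos.length) :
    ((List.range (pos.length - 1)).map (fun i => (cntFrom pos i : Int))).sum
      = ((((List.range pos.length).map (fun r => cntTo pos r)).sum : Nat) : Int) := by
  have hlast : cntFrom pos (pos.length - 1) = 0 := by
    unfold cntFrom
    rw [List.drop_eq_nil_of_le (by simp; omega)]
    rfl
  have hsplit : ((List.range pos.length).map (fun i => cntFrom pos i)).sum
      = ((List.range (pos.length - 1)).map (fun i => cntFrom pos i)).sum := by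
    rw [show pos.length = (pos.length - 1) + 1 by omega, List.range_succ, List.map_append, List.sum_append]
    simp [hlast]
  have hx := pair_exchange (fun i j => decide (pos.getD j 0 - pos.getD i 0 < 5)) pos.length
  rw [sum_map_cast]
  congr 1
  rw [← hsplit]
  unfold cntFrom cntTo
  exact hx


theorem qual_eq (pos : List Int) (hmono : Mono pos) (hn : 3 ≤ pos.length) :
    (aOuter pos (List.range (pos.length - 1)) 0 = true) ↔ (3 ≤ bSweep pos) := by
  rw [aOuter_spec pos _ 0 (by norm_num)]
  rw [bSweep_eq pos hmono (by omega)]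
  rw [decide_eq_true_eq, zero_add, sum_cntFrom_eq pos (by omega)]

theorem positions_value_mono (filtered : List String) (w : String) :
    Mono (((PySem.List.enumerate filtered).foldl
      (fun d p => d.modify p.2 [] (fun l => l ++ [p.1])) PySem.Dict.empty).getD w []) := by
  have hfold : ((PySem.List.enumerate filtered).foldl
      (fun d p => d.modify p.2 [] (fun l => l ++ [p.1])) PySem.Dict.empty)
      = (((PySem.List.enumerate filtered).map (fun p => (p.2, p.1))).foldl
      (fun d q => d.modify q.1 [] (fun l => l ++ [q.2])) PySem.Dict.empty) := by
    rw [List.foldl_map]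
  rw [hfold, PySem.Dict.getD_foldl_modify_append]
  simp only [PySem.Dict.getD_empty, List.nil_append]  -- getD of empty?
  unfold Mono
  rw [List.pairwise_map]
  apply List.Pairwise.filter
  rw [List.pairwise_map]
  exact PySem.List.pairwise_lt_enumerate filtered 0

theorem group_fused (p : String → Bool) :
    ∀ (wl : List String) (d : PySem.Dict String (List Int)) (k : Int),
    (wl.foldl
      (fun (st : PySem.Dict String (List Int) × Int) w =>
        if p w then (st.1.modify w [] (fun l => l ++ [st.2]), st.2 + 1) else st) (d, k)).1
      = (PySem.List.enumerate (wl.filter p) k).foldl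
          (fun d q => d.modify q.2 [] (fun l => l ++ [q.1])) d := by
  intro wl
  induction wl with
  | nil => intro d k; simp
  | cons w t ih =>
    intro d k
    rw [List.foldl_cons, List.filter_cons]
    by_cases hw : p w
    · simp only [hw, if_true]
      rw [PySem.List.enumerate_cons, List.foldl_cons]
      exact ih _ _
    · simp only [hw, if_false, Bool.false_eq_true]
      exact ih d k



theorem count_parallelism_main (wl cl : List String) :
    count_parallelism wl cl = count_parallelism_alt wl cl := by
  unfold count_parallelism count_parallelism_alt
  have hconj : ∀ w : String, (PySem.Set.ofList cl).contains w = cl.contains w := by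
    intro w; simp [PySem.Set.contains, PySem.Set.mem_ofList]
  simp only [hconj]
  rw [group_fused (fun item => cl.contains item) wl PySem.Dict.empty 0]
  set P := (PySem.List.enumerate (wl.filter (fun item => cl.contains item)) 0).foldl
      (fun d q => d.modify q.2 [] (fun l => l ++ [q.1])) PySem.Dict.empty with hP
  have hnodup : P.keys.Nodup := by
    rw [hP]
    exact PySem.Dict.nodup_keys_foldl_modify_key
      (PySem.List.enumerate (wl.filter (fun item => cl.contains item)) 0)
      (fun (q : Int × String) => q.2) []
      (fun (d : PySem.Dict String (List Int)) (q : Int × String) => fun l => l ++ [q.1])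
      PySem.Dict.empty PySem.Dict.nodup_keys_empty
  have hmono : ∀ p ∈ P.items, Mono p.2 := by
    intro p hp
    rw [PySem.Dict.items_eq_map_keys P hnodup []] at hp
    obtain ⟨k, _, rfl⟩ := List.mem_map.mp hp
    exact positions_value_mono _ k
  -- collapse A's nested ifs and turn the append loop into a filter
  have hA : ∀ (res : List String) (p : String × List Int), p ∈ P.items →
      (if p.2.length ≥ 3 then
        (if aOuter p.2 (List.range (p.2.length - 1)) 0 then res ++ [p.1] else res)
      else res)
      = (if (3 ≤ p.2.length ∧ 3 ≤ bSweep p.2) then res ++ [p.1] else res) := by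
    intro res p hp
    by_cases h3 : 3 ≤ p.2.length
    · have hq := qual_eq p.2 (hmono p hp) h3
      by_cases hout : aOuter p.2 (List.range (p.2.length - 1)) 0 = true
      · rw [if_pos h3, if_pos hout, if_pos ⟨h3, hq.mp hout⟩]
      · simp only [hout, Bool.false_eq_true] at hq ⊢
        rw [if_pos h3, if_neg (by simp), if_neg (by tauto)]
    · rw [if_neg h3, if_neg (by tauto)]
  rw [PySem.List.foldl_congr_mem P.items
      (fun res p => if p.2.length ≥ 3 then
        (if aOuter p.2 (List.range (p.2.length - 1)) 0 then res ++ [p.1] else res) else res)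
      (fun res p => if (3 ≤ p.2.length ∧ 3 ≤ bSweep p.2) then res ++ [p.1] else res)
      [] (fun res p hp => hA res p hp)]
  rw [PySem.List.foldl_append_ite (p := fun p : String × List Int => 3 ≤ p.2.length ∧ 3 ≤ bSweep p.2) (f := fun p => p.1)]
  -- collapse B's nested ifs and turn the counting loop into a countP
  have hB : ∀ (n : Int) (pos : List Int),
      (if pos.length ≥ 3 then (if bSweep pos ≥ 3 then n + 1 else n) else n)
      = (if (3 ≤ pos.length ∧ 3 ≤ bSweep pos) then n + 1 else n) := by
    intro n pos
    split_ifs <;> tauto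
  rw [show P.values = P.items.map (fun p => p.2) from rfl]
  rw [List.foldl_map]
  rw [PySem.List.foldl_congr_mem P.items
      (fun n p => if p.2.length ≥ 3 then (if bSweep p.2 ≥ 3 then n + 1 else n) else n)
      (fun n p => if (3 ≤ p.2.length ∧ 3 ≤ bSweep p.2) then n + 1 else n)
      0 (fun n p _ => hB n p.2)]
  rw [PySem.List.foldl_ite_add_one (p := fun p : String × List Int => 3 ≤ p.2.length ∧ 3 ≤ bSweep p.2)]
  simp [List.countP_eq_length_filter]

-- ===== VERDICT (by name: the statement is the Claim_ definition above) =====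
theorem count_parallelism_spec : Claim_equal_count_parallelism := by
  unfold Claim_equal_count_parallelism Spec_count_parallelism
  intro wl cl _
  exact count_parallelism_main wl cl
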